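-- pv_equiv track=rewrite | github.com/pypi-data/pypi-mirror-383 | packages/jjinx/jjinx-0.0.1.tar.gz/jjinx-0.0.1/src/jinx/execution/numpy/printing.py | box_1D_or_2D_to_rows
-- ===== SOURCE A (Python) =====
-- import itertools
-- from typing import Sequence
--
-- BatchedRowsT = Sequence[str] | Sequence["BatchedRowsT"]
--
-- def box_1D_or_2D_to_rows(box: BatchedRowsT, widths: list[int]) -> list[str]:
--     """Convert a 2D box (list of list of strings) to a list of strings for printing."""
--     rows = [box_top_line(widths=widths)]
--     for n, box_row in enumerate(box):
--         for row_item_row in itertools.zip_longest(*box_row, fillvalue=""):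
--             vals = [str(val).ljust(width) for val, width in zip(row_item_row, widths)]
--             row = "│" + "│".join(vals) + "│"
--             rows.append(row)
--
--         if n < len(box) - 1:
--             rows.append(box_row_divider_line(widths=widths))
--
--     rows.append(box_bottom_line(widths=widths))
--     return rows
--
-- def box_top_line(widths: list[int]) -> str:
--     return "┌" + "┬".join(["─" * width for width in widths]) + "┐"
--
-- def box_row_divider_line(widths: list[int]) -> str:
--     return "├" + "┼".join(["─" * width for width in widths]) + "┤"
--
-- def box_bottom_line(widths: list[int]) -> str:
--     return "└" + "┴".join(["─" * width for width in widths]) + "┘"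
-- ===== SOURCE B (Python) =====
-- def box_1D_or_2D_to_rows(box, widths):
--     """Convert a 2D box (list of list of strings) to a list of strings for printing.
--
--     Column-major rendering: instead of transposing each box row into item-rows,
--     grow every text line in place, one column at a time."""
--
--     def border(left, mid, right):
--         return left + mid.join("─" * w for w in widths) + right
--
--     def block(box_row):
--         # paint the block column by column onto a canvas of partial lines
--         height = max(map(len, box_row), default=0)
--         lines = [""] * height
--         for j, (col, width) in enumerate(zip(box_row, widths)):
--             sep = "│" if j else ""
--             lines = [line + sep + (col[i] if i < len(col) else "").ljust(width)
--                      for i, line in enumerate(lines)]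
--         return ["│" + line + "│" for line in lines]
--
--     out = [border("┌", "┬", "┐")]
--     for k, box_row in enumerate(box):
--         if k:
--             out.append(border("├", "┼", "┤"))
--         out.extend(block(box_row))
--     out.append(border("└", "┴", "┘"))
--     return out
-- ===== Notes on version B (the rewrite author's own statement) =====
-- stated objective: alternative
-- what changed: B renders each box row column-major: it grows a canvas of partial text lines in place, appending one padded column at a time (no zip_longest transposition into item-rows), and places the divider before every block except the first instead of A's 'after every row except the last' test.
import Mathlib
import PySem

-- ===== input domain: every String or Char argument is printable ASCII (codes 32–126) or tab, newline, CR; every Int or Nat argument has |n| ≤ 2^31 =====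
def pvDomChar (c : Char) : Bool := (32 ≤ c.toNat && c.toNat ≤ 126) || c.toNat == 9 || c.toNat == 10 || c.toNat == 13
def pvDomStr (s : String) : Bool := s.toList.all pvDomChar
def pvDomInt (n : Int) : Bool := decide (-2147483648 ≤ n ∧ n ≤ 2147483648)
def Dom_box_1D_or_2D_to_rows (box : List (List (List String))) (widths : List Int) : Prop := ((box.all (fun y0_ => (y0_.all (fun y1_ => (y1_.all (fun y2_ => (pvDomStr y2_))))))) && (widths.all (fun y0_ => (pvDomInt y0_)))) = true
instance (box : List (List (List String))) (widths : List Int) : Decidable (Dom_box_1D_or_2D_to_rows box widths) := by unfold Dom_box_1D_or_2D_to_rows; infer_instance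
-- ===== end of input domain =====

-- B renders each box row COLUMN-MAJOR: it grows a canvas of partial text lines in place, one
-- padded column at a time (no zip_longest transposition into item-rows), and puts the divider
-- before every block except the first instead of A's after-every-row-except-the-last test.
-- Objective: alternative (same cost, different traversal order).

-- ===== PORT A =====
-- '"─" * width' (Python: negative width gives "")
def pvHbar (width : Int) : String := String.ofList (List.replicate width.toNat '─')

-- 'str(val).ljust(width)' — val is already a str; shared port of the builtin str.ljust
def pvLjust (s : String) (width : Int) : String :=
  s ++ String.ofList (List.replicate (width - (PySem.Str.len s : Int)).toNat ' ')

def box_top_line (widths : List Int) : String :=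
  "┌" ++ PySem.Str.join "┬" (widths.map (fun width => pvHbar width)) ++ "┐"

def box_row_divider_line (widths : List Int) : String :=
  "├" ++ PySem.Str.join "┼" (widths.map (fun width => pvHbar width)) ++ "┤"

def box_bottom_line (widths : List Int) : String :=
  "└" ++ PySem.Str.join "┴" (widths.map (fun width => pvHbar width)) ++ "┘"

-- itertools.zip_longest(*box_row, fillvalue="") as a list of rows (exact: yields
-- max-column-length rows, each one entry per column, "" where a column is exhausted)
def pvZipLongest (box_row : List (List String)) : List (List String) :=
  (List.range (box_row.foldl (fun acc col => max acc col.length) 0)).map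
    (fun i => box_row.map (fun col => col.getD i ""))

def box_1D_or_2D_to_rows (box : List (List (List String))) (widths : List Int) : List String :=
  let rows : List String := [box_top_line widths]
  let rows := (PySem.List.enumerate box).foldl (fun rows p =>
    let rows := rows ++ (pvZipLongest p.2).map (fun row_item_row =>
      "│" ++ PySem.Str.join "│" ((row_item_row.zip widths).map (fun vw => pvLjust vw.1 vw.2)) ++ "│")
    if p.1 < (box.length : Int) - 1 then rows ++ [box_row_divider_line widths] else rows) rows
  rows ++ [box_bottom_line widths]

-- ===== PORT B =====
def pvBorder (widths : List Int) (left mid right : String) : String :=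
  left ++ PySem.Str.join mid (widths.map (fun w => pvHbar w)) ++ right

-- Source B's block: canvas of `height` empty lines, painted column by column
-- ('lines = [line + sep + (col[i] if i < len(col) else "").ljust(width) for i, line in enumerate(lines)]')
def pvBlockB (widths : List Int) (box_row : List (List String)) : List String :=
  let height := box_row.foldl (fun acc col => max acc col.length) 0  -- max(map(len, box_row), default=0)
  let lines := (PySem.List.enumerate (box_row.zip widths)).foldl
    (fun lines p =>
      let sep : String := if p.1 == 0 then "" else "│"
      (PySem.List.enumerate lines).map (fun q =>
        q.2 ++ sep ++ pvLjust (if q.1 < (p.2.1.length : Int) then p.2.1.getD q.1.toNat "" else "") p.2.2))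
    (List.replicate height "")
  lines.map (fun line => "│" ++ line ++ "│")

def box_1D_or_2D_to_rows_alt (box : List (List (List String))) (widths : List Int) : List String :=
  let out : List String := [pvBorder widths "┌" "┬" "┐"]
  let out := (PySem.List.enumerate box).foldl (fun out p =>
    (if p.1 == 0 then out else out ++ [pvBorder widths "├" "┼" "┤"]) ++ pvBlockB widths p.2) out
  out ++ [pvBorder widths "└" "┴" "┘"]

-- ===== PRECONDITION & SPEC =====
def Spec_box_1D_or_2D_to_rows (box : List (List (List String))) (widths : List Int) (out : List String) : Prop := out = box_1D_or_2D_to_rows_alt box widths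
instance (box : List (List (List String))) (widths : List Int) (out : List String) : Decidable (Spec_box_1D_or_2D_to_rows box widths out) := by unfold Spec_box_1D_or_2D_to_rows; infer_instance

-- ===== CLAIM (what is proved, stated in full; the proofs are below) =====
def Claim_equal_box_1D_or_2D_to_rows : Prop := ∀ (box : List (List (List String))) (widths : List Int), Dom_box_1D_or_2D_to_rows box widths → Spec_box_1D_or_2D_to_rows box widths (box_1D_or_2D_to_rows box widths)

-- ===== LEMMAS AND PROOFS =====

-- the padded value a column contributes to transposed line i
def pvVal (i : Nat) (p : List String × Int) : String := pvLjust (p.1.getD i "") p.2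

-- the part of B's line i contributed by the columns `ps`, first painted at column index j
def pvTail (ps : List (List String × Int)) (j : Nat) (i : Nat) : String :=
  match ps with
  | [] => ""
  | p :: ps => (if j = 0 then "" else "│") ++ (pvVal i p ++ pvTail ps (j + 1) i)

-- index-annotated list (Nat-level mirror of enumerate, convenient for the canvas invariant)
def pvWithIdx (L : List String) (i : Nat) : List (Nat × String) :=
  match L with
  | [] => []
  | a :: t => (i, a) :: pvWithIdx t (i + 1)

lemma enumerate_eq_withIdx (L : List String) : ∀ n : Nat,
    PySem.List.enumerate L (n : Int) = (pvWithIdx L n).map (fun q => ((q.1 : Int), q.2)) := by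
  induction L with
  | nil => intro n; simp [PySem.List.enumerate_nil, pvWithIdx]
  | cons a t ih =>
      intro n
      rw [PySem.List.enumerate_cons, pvWithIdx, List.map_cons,
        show ((n : Int) + 1) = ((n + 1 : Nat) : Int) by push_cast; ring, ih (n + 1)]

lemma withIdx_map_snd (L : List String) : ∀ i, (pvWithIdx L i).map (fun q => q.2) = L := by
  induction L with
  | nil => intro i; rfl
  | cons a t ih => intro i; simp [pvWithIdx, ih]

lemma withIdx_map (f : Nat × String → String) (L : List String) : ∀ i,
    pvWithIdx ((pvWithIdx L i).map f) i
      = (pvWithIdx L i).map (fun q => (q.1, f q)) := by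
  induction L with
  | nil => intro i; rfl
  | cons a t ih => intro i; simp [pvWithIdx, ih]

lemma withIdx_replicate : ∀ (h i : Nat),
    pvWithIdx (List.replicate h "") i = (List.range' i h).map (fun k => (k, "")) := by
  intro h
  induction h with
  | zero => intro i; rfl
  | succ h ih => intro i; simp [List.replicate_succ, pvWithIdx, List.range'_succ, ih]

-- one column-painting step of B, rewritten onto the Nat-indexed canvas
lemma step_eq (L : List String) (p : List String × Int) (sep : String) :
    (PySem.List.enumerate L).map (fun q =>
        q.2 ++ sep ++ pvLjust (if q.1 < (p.1.length : Int) then p.1.getD q.1.toNat "" else "") p.2)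
      = (pvWithIdx L 0).map (fun q => q.2 ++ sep ++ pvVal q.1 p) := by
  rw [show (PySem.List.enumerate L) = PySem.List.enumerate L ((0 : Nat) : Int) from rfl,
    enumerate_eq_withIdx L 0, List.map_map]
  refine List.map_congr_left ?_
  intro q _
  simp only [Function.comp, Int.toNat_natCast, pvVal]
  congr 1
  by_cases h : q.1 < p.1.length
  · rw [if_pos (by exact_mod_cast h)]
  · rw [if_neg (by exact_mod_cast h), List.getD_eq_getElem?_getD,
      List.getElem?_eq_none (by omega)]
    rfl

-- B's canvas fold, as a pointwise map over the indexed start canvas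
lemma foldB_inv (ps : List (List String × Int)) : ∀ (j : Nat) (L : List String),
    (PySem.List.enumerate ps (j : Int)).foldl
      (fun lines p =>
        let sep : String := if p.1 == 0 then "" else "│"
        (PySem.List.enumerate lines).map (fun q =>
          q.2 ++ sep ++ pvLjust (if q.1 < (p.2.1.length : Int) then p.2.1.getD q.1.toNat "" else "") p.2.2))
      L
    = (pvWithIdx L 0).map (fun q => q.2 ++ pvTail ps j q.1) := by
  induction ps with
  | nil =>
      intro j L
      simp only [PySem.List.enumerate_nil, List.foldl_nil, pvTail]
      rw [show (fun q : Nat × String => q.2 ++ "") = (fun q : Nat × String => q.2) by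
        funext q; simp]
      exact (withIdx_map_snd L 0).symm
  | cons p ps ih =>
      intro j L
      rw [PySem.List.enumerate_cons, List.foldl_cons,
        show ((j : Int) + 1) = ((j + 1 : Nat) : Int) by push_cast; ring, ih (j + 1)]
      have hsep : ((j : Int) == 0) = (decide (j = 0)) := by
        by_cases hj : j = 0
        · subst hj; rfl
        · simp [hj]
      simp only [hsep]
      rw [step_eq L p (if decide (j = 0) = true then "" else "│"),
        withIdx_map (fun q => q.2 ++ (if decide (j = 0) = true then "" else "│") ++ pvVal q.1 p) L 0,
        List.map_map]
      refine List.map_congr_left ?_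
      intro q _
      simp only [Function.comp, pvTail]
      by_cases hj : j = 0 <;> simp [hj, String.append_assoc]

-- joining with "│" equals joining with a leading "" dropped
lemma join_cons_eq_empty_cons (x : String) (xs : List String) :
    PySem.Str.join "│" (x :: xs) = x ++ PySem.Str.join "│" ("" :: xs) := by
  cases xs with
  | nil =>
      apply String.toList_inj.mp
      simp [PySem.Chars.join_singleton]
  | cons y ys =>
      apply String.toList_inj.mp
      simp [PySem.Chars.join_cons_cons]

lemma tail_pos (ps : List (List String × Int)) : ∀ (i j : Nat),
    pvTail ps (j + 1) i = PySem.Str.join "│" ("" :: ps.map (pvVal i)) := by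
  induction ps with
  | nil =>
      intro i j
      apply String.toList_inj.mp
      simp [pvTail, PySem.Chars.join_singleton]
  | cons p ps ih =>
      intro i j
      show (if j + 1 = 0 then "" else "│") ++ (pvVal i p ++ pvTail ps (j + 1 + 1) i) = _
      rw [if_neg (by omega), ih i (j + 1), ← join_cons_eq_empty_cons]
      apply String.toList_inj.mp
      simp [PySem.Chars.join_cons_cons]

lemma tail_zero (ps : List (List String × Int)) (i : Nat) :
    pvTail ps 0 i = PySem.Str.join "│" (ps.map (pvVal i)) := by
  cases ps with
  | nil => rfl
  | cons p ps =>
      show (if (0 : Nat) = 0 then "" else "│") ++ (pvVal i p ++ pvTail ps 1 i) = _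
      rw [if_pos rfl, tail_pos ps i 0, ← join_cons_eq_empty_cons]
      apply String.toList_inj.mp
      simp

-- B's block = A's block (the zip_longest/transpose form)
lemma blockB_eq_block (widths : List Int) (box_row : List (List String)) :
    pvBlockB widths box_row =
      (pvZipLongest box_row).map (fun row_item_row =>
        "│" ++ PySem.Str.join "│"
            ((row_item_row.zip widths).map (fun vw => pvLjust vw.1 vw.2)) ++ "│") := by
  simp only [pvBlockB, pvZipLongest]
  rw [show (PySem.List.enumerate (box_row.zip widths))
        = PySem.List.enumerate (box_row.zip widths) ((0 : Nat) : Int) from rfl,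
    foldB_inv (box_row.zip widths) 0, withIdx_replicate, List.map_map, List.map_map,
    List.range_eq_range']
  simp only [List.map_map]
  refine List.map_congr_left ?_
  intro i _
  simp only [Function.comp, tail_zero]
  have hzip : (box_row.map (fun col => col.getD i "")).zip widths
      = (box_row.zip widths).map (fun p => (p.1.getD i "", p.2)) := by
    rw [show (fun p : List String × Int => (p.1.getD i "", p.2))
          = Prod.map (fun col : List String => col.getD i "") id by funext p; rfl]
    exact List.zip_map_left
  rw [hzip, List.map_map]
  rfl

-- the separator-joined body, in flatMap normal form
def pvBody (block : List (List String) → List String) (sep : String) :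
    List (List (List String)) → List String
  | [] => []
  | r :: rs => block r ++ rs.flatMap (fun r' => sep :: block r')

-- A's outer loop (divider after every row except the last) produces pvBody
lemma a_fold (block : List (List String) → List String) (sep : String) (N : Nat) :
    ∀ (bs : List (List (List String))) (k : Nat) (init : List String),
      k + bs.length = N →
      (PySem.List.enumerate bs (k : Int)).foldl (fun rows p =>
          (rows ++ block p.2) |> (fun rows' =>
            if p.1 < (N : Int) - 1 then rows' ++ [sep] else rows')) init
        = init ++ pvBody block sep bs := by
  intro bs
  induction bs with
  | nil => intro k init _; simp [PySem.List.enumerate_nil, pvBody]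
  | cons b t ih =>
      intro k init hk
      rw [PySem.List.enumerate_cons, List.foldl_cons]
      cases t with
      | nil =>
          have hcond : ¬ ((k : Int) < (N : Int) - 1) := by
            simp at hk; omega
          simp [PySem.List.enumerate_nil, hcond, pvBody]
      | cons x t' =>
          have hcond : (k : Int) < (N : Int) - 1 := by
            simp at hk; omega
          rw [show ((k : Int) + 1) = ((k + 1 : Nat) : Int) by push_cast; ring] at *
          rw [ih (k + 1) _ (by simp at hk ⊢; omega)]
          simp [hcond, pvBody, List.flatMap_cons]

-- B's outer loop (divider before every block except the first), tail part: k ≥ 1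
lemma b_fold_pos (block : List (List String) → List String) (sep : String) :
    ∀ (bs : List (List (List String))) (k : Nat) (init : List String), 1 ≤ k →
      (PySem.List.enumerate bs (k : Int)).foldl (fun out p =>
          (if p.1 == 0 then out else out ++ [sep]) ++ block p.2) init
        = init ++ bs.flatMap (fun b => sep :: block b) := by
  intro bs
  induction bs with
  | nil => intro k init _; simp [PySem.List.enumerate_nil]
  | cons b t ih =>
      intro k init hk
      rw [PySem.List.enumerate_cons, List.foldl_cons,
        show ((k : Int) + 1) = ((k + 1 : Nat) : Int) by push_cast; ring]
      have hne : ((k : Int) == 0) = false := by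
        rw [beq_eq_false_iff_ne]
        omega
      rw [hne, ih (k + 1) _ (by omega)]
      simp [List.flatMap_cons]

lemma b_fold (block : List (List String) → List String) (sep : String)
    (bs : List (List (List String))) (init : List String) :
    (PySem.List.enumerate bs).foldl (fun out p =>
        (if p.1 == 0 then out else out ++ [sep]) ++ block p.2) init
      = init ++ pvBody block sep bs := by
  cases bs with
  | nil => simp [PySem.List.enumerate_nil, pvBody]
  | cons b t =>
      rw [show (PySem.List.enumerate (b :: t)) = PySem.List.enumerate (b :: t) ((0 : Nat) : Int)
          from rfl,
        PySem.List.enumerate_cons, List.foldl_cons,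
        show (((0 : Nat) : Int) + 1) = ((1 : Nat) : Int) by norm_num]
      simp only [Int.natCast_zero, beq_self_eq_true, if_true]
      rw [b_fold_pos block sep t 1 (init ++ block b) (by omega)]
      simp [pvBody]

-- ===== VERDICT (by name: the statement is the Claim_ definition above) =====
theorem box_1D_or_2D_to_rows_spec : Claim_equal_box_1D_or_2D_to_rows := by
  intro box widths _
  show box_1D_or_2D_to_rows box widths = box_1D_or_2D_to_rows_alt box widths
  simp only [box_1D_or_2D_to_rows, box_1D_or_2D_to_rows_alt]
  have ha := a_fold
    (fun r => (pvZipLongest r).map (fun row_item_row =>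
      "│" ++ PySem.Str.join "│"
        ((row_item_row.zip widths).map (fun vw => pvLjust vw.1 vw.2)) ++ "│"))
    (box_row_divider_line widths) box.length box 0 [box_top_line widths] (by simp)
  simp only [Int.natCast_zero] at ha
  rw [ha, b_fold (pvBlockB widths) (pvBorder widths "├" "┼" "┤") box]
  have hb : pvBlockB widths = (fun r => (pvZipLongest r).map
      (fun row_item_row => "│" ++ PySem.Str.join "│"
        ((row_item_row.zip widths).map (fun vw => pvLjust vw.1 vw.2)) ++ "│")) := by
    funext r; exact blockB_eq_block widths r
  rw [hb]
  simp [box_top_line, box_row_divider_line, box_bottom_line, pvBorder]
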